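-- pv_equiv track=rewrite | github.com/Veks7/MAI_python | 4 kata/Domino Tiling - 2 x N Board.py | two_by_n
-- ===== SOURCE A (Python) =====
-- def two_by_n(n, k):
--     mass1 = [0, 0, 0]
--     mass2 = [1, 0, 0]
--     for _ in range(n):
--         mass3 = [0, 0, 0]
--
--         mass3[1] = mass2[0] * k + mass2[1] * (k-1) + mass2[2] * (k-2)
--         mass3[2] = mass1[0] * k * (k-1)
--         mass3[2] += mass1[1] * (k-1) * (k-2)
--         mass3[2] += mass1[2] * (k-1)
--         mass3[2] += mass1[2] * (k-2) * (k-2)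
--
--         mass3 = [x % 12345787 for x in mass3]
--         mass1 = mass2
--         mass2 = mass3
--
--     return sum(mass2) % 12345787
-- ===== SOURCE B (Python) =====
-- M = 12345787
--
-- def _mat_mul(A, B):
--     return [[sum(A[i][t] * B[t][j] for t in range(6)) % M for j in range(6)] for i in range(6)]
--
-- def _mat_pow(A, e):
--     R = [[1 if i == j else 0 for j in range(6)] for i in range(6)]
--     while e > 0:
--         if e & 1:
--             R = _mat_mul(R, A)
--         A = _mat_mul(A, A)
--         e >>= 1
--     return R
--
-- def two_by_n(n, k):
--     T = [[0, 0, 0, 0, 0, 0],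
--          [k, k - 1, k - 2, 0, 0, 0],
--          [0, 0, 0, k * (k - 1), (k - 1) * (k - 2), (k - 1) + (k - 2) * (k - 2)],
--          [1, 0, 0, 0, 0, 0],
--          [0, 1, 0, 0, 0, 0],
--          [0, 0, 1, 0, 0, 0]]
--     T = [[x % M for x in row] for row in T]
--     P = _mat_pow(T, n if n > 0 else 0)
--     return (P[0][0] + P[1][0] + P[2][0]) % M
-- ===== Notes on version B (the rewrite author's own statement) =====
-- stated objective: faster
-- what changed: Replaces A's step-by-step O(n) linear-recurrence loop with binary exponentiation of the constant 6x6 transition matrix mod 12345787.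
import Mathlib
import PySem

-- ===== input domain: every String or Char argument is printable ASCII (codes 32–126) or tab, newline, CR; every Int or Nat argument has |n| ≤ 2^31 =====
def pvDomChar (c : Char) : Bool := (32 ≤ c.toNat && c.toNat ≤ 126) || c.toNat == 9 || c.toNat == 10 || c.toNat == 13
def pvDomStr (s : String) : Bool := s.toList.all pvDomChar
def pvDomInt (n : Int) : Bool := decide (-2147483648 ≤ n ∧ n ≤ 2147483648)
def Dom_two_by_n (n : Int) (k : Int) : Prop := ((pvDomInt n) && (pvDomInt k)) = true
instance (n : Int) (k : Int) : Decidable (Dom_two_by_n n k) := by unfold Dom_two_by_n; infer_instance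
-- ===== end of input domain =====

-- B replaces A's O(n) linear-recurrence loop by binary exponentiation of the 6x6 transition matrix (asymptotically faster).


-- ===== PORT A =====
-- state = (mass1, mass2), each a triple of Ints; one iteration of A's for-body
def pvStepA (k : Int) (s : (Int × Int × Int) × (Int × Int × Int)) :
    (Int × Int × Int) × (Int × Int × Int) :=
  let m1 := s.1
  let m2 := s.2
  let t1 := m2.1 * k + m2.2.1 * (k - 1) + m2.2.2 * (k - 2)
  let t2 := m1.1 * k * (k - 1) + m1.2.1 * (k - 1) * (k - 2) + m1.2.2 * (k - 1)
            + m1.2.2 * (k - 2) * (k - 2)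
  (m2, (PySem.Int.mod 0 12345787, PySem.Int.mod t1 12345787, PySem.Int.mod t2 12345787))

def two_by_n (n : Int) (k : Int) : Int :=
  let s := (PySem.List.pyRange 0 n 1).foldl (fun s _ => pvStepA k s) ((0, 0, 0), (1, 0, 0))
  PySem.Int.mod (s.2.1 + s.2.2.1 + s.2.2.2) 12345787

-- ===== PORT B =====
-- A[i][j] on Source B's always-in-range indices (6x6 lists)
def pvIx (A : List (List Int)) (i j : Nat) : Int := (A.getD i []).getD j 0

-- Source B's list comprehension [[f(i,j) for j in range(6)] for i in range(6)]
def pvBuild (f : Nat → Nat → Int) : List (List Int) :=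
  (List.range 6).map (fun i => (List.range 6).map (fun j => f i j))

def pvMatMul (A B : List (List Int)) : List (List Int) :=
  pvBuild (fun i j =>
    PySem.Int.mod (((List.range 6).map (fun t => pvIx A i t * pvIx B t j)).sum) 12345787)

def pvMatId : List (List Int) := pvBuild (fun i j => if i = j then 1 else 0)

-- Source B's `while e > 0: if e & 1: R = R*A; A = A*A; e >>= 1`
def pvMatPowLoop (e : Nat) (A R : List (List Int)) : List (List Int) :=
  if e = 0 then R
  else pvMatPowLoop (e / 2) (pvMatMul A A) (if e % 2 = 1 then pvMatMul R A else R)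
  termination_by e
  decreasing_by exact Nat.div_lt_self (Nat.pos_of_ne_zero (by assumption)) (by norm_num)

-- the transition-matrix literal of Source B, then the mod-reduction pass
def pvMatT (k : Int) : List (List Int) :=
  [[0, 0, 0, 0, 0, 0],
   [k, k - 1, k - 2, 0, 0, 0],
   [0, 0, 0, k * (k - 1), (k - 1) * (k - 2), (k - 1) + (k - 2) * (k - 2)],
   [1, 0, 0, 0, 0, 0],
   [0, 1, 0, 0, 0, 0],
   [0, 0, 1, 0, 0, 0]].map (fun row => row.map (fun x => PySem.Int.mod x 12345787))

def two_by_n_alt (n : Int) (k : Int) : Int :=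
  -- `_mat_pow(T, n if n > 0 else 0)`: the Int loop count `while e > 0` is exactly e.toNat steps
  let P := pvMatPowLoop n.toNat (pvMatT k) pvMatId
  PySem.Int.mod (pvIx P 0 0 + pvIx P 1 0 + pvIx P 2 0) 12345787

-- ===== PRECONDITION & SPEC =====
def Spec_two_by_n (n : Int) (k : Int) (out : Int) : Prop := out = two_by_n_alt n k
instance (n : Int) (k : Int) (out : Int) : Decidable (Spec_two_by_n n k out) := by unfold Spec_two_by_n; infer_instance

-- ===== CLAIM (what is proved, stated in full; the proofs are below) =====
def Claim_equal_two_by_n : Prop := ∀ (n : Int) (k : Int), Dom_two_by_n n k → Spec_two_by_n n k (two_by_n n k)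

-- ===== LEMMAS AND PROOFS =====

def pvMcast (A : List (List Int)) : Matrix (Fin 6) (Fin 6) (ZMod 12345787) :=
  Matrix.of fun i j => ((pvIx A i.1 j.1 : Int) : ZMod 12345787)

lemma pv_cast_mod (a : Int) :
    ((PySem.Int.mod a 12345787 : Int) : ZMod 12345787) = (a : ZMod 12345787) := by
  rw [PySem.Int.mod_eq_emod_of_pos (by norm_num)]
  exact_mod_cast ZMod.intCast_mod a 12345787

lemma pv_cast_emod (a : Int) :
    ((a % (12345787 : Int) : Int) : ZMod 12345787) = (a : ZMod 12345787) := by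
  exact_mod_cast ZMod.intCast_mod a 12345787

lemma pvIx_build (f : Nat → Nat → Int) (i j : Fin 6) :
    pvIx (pvBuild f) i.1 j.1 = f i.1 j.1 := by
  rcases i with ⟨i, hi⟩
  rcases j with ⟨j, hj⟩
  simp [pvIx, pvBuild, List.getD_eq_getElem?_getD, hi, hj]

lemma pv_mcast_mul (A B : List (List Int)) :
    pvMcast (pvMatMul A B) = pvMcast A * pvMcast B := by
  ext i j
  simp only [pvMcast, pvMatMul, Matrix.of_apply, Matrix.mul_apply, pvIx_build]
  rw [pv_cast_mod]
  simp [List.range_succ, Fin.sum_univ_six]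
  ring

lemma pv_mcast_id : pvMcast pvMatId = 1 := by
  ext i j
  simp only [pvMcast, pvMatId, Matrix.of_apply, pvIx_build]
  have : (i.1 = j.1) = (i = j) := by
    simp [Fin.ext_iff]
  simp [Matrix.one_apply, this, apply_ite (fun x : Int => (x : ZMod 12345787))]

lemma pv_powLoop (e : Nat) (A R : List (List Int)) :
    pvMcast (pvMatPowLoop e A R) = pvMcast R * pvMcast A ^ e := by
  induction e using Nat.strong_induction_on generalizing A R with
  | _ e ih =>
    rw [pvMatPowLoop]
    by_cases h : e = 0
    · simp [h]
    · rw [if_neg h, ih (e / 2) (Nat.div_lt_self (Nat.pos_of_ne_zero h) (by norm_num)),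
        pv_mcast_mul]
      rcases Nat.mod_two_eq_zero_or_one e with h2 | h2
      · rw [if_neg (by omega)]
        congr 1
        rw [← sq, ← pow_mul]
        congr 1
        omega
      · rw [if_pos h2, pv_mcast_mul, mul_assoc]
        congr 1
        rw [← sq, ← pow_mul, ← pow_succ']
        congr 1
        omega

-- the state of A's loop, cast to a 6-vector over ZMod
def pvScast (s : (Int × Int × Int) × (Int × Int × Int)) : Fin 6 → ZMod 12345787 :=
  fun i => match i.1 with
  | 0 => (s.2.1 : ZMod 12345787)
  | 1 => (s.2.2.1 : ZMod 12345787)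
  | 2 => (s.2.2.2 : ZMod 12345787)
  | 3 => (s.1.1 : ZMod 12345787)
  | 4 => (s.1.2.1 : ZMod 12345787)
  | _ => (s.1.2.2 : ZMod 12345787)

def pvIterA (k : Int) (m : Nat) : (Int × Int × Int) × (Int × Int × Int) :=
  (List.range m).foldl (fun s _ => pvStepA k s) ((0, 0, 0), (1, 0, 0))

lemma pv_step_cast (k : Int) (s : (Int × Int × Int) × (Int × Int × Int)) (i : Fin 6) :
    pvScast (pvStepA k s) i = ∑ t : Fin 6, pvMcast (pvMatT k) i t * pvScast s t := by
  fin_cases i <;>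
    simp [pvStepA, pvScast, pvMcast, pvMatT, pvIx, Fin.sum_univ_six] <;>
    push_cast [pv_cast_emod] <;> ring

lemma pv_iter_col (k : Int) (m : Nat) (i : Fin 6) :
    pvScast (pvIterA k m) i = (pvMcast (pvMatT k) ^ m) i 0 := by
  induction m generalizing i with
  | zero =>
    rw [pow_zero]
    fin_cases i <;> simp [pvIterA, pvScast, Matrix.one_apply]
  | succ m ih =>
    have hstep : pvIterA k (m + 1) = pvStepA k (pvIterA k m) := by
      simp [pvIterA, List.range_succ]
    rw [hstep, pv_step_cast]
    simp only [ih]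
    rw [pow_succ']
    rw [Matrix.mul_apply]

-- ===== VERDICT (by name: the statement is the Claim_ definition above) =====
theorem two_by_n_spec : Claim_equal_two_by_n := by
  intro n k _
  unfold Spec_two_by_n
  have h1 : two_by_n n k = PySem.Int.mod ((pvIterA k n.toNat).2.1 + (pvIterA k n.toNat).2.2.1
      + (pvIterA k n.toNat).2.2.2) 12345787 := by
    unfold two_by_n pvIterA
    rw [PySem.List.pyRange_one, List.foldl_map]
    norm_num
  have h2 : two_by_n_alt n k = PySem.Int.mod (pvIx (pvMatPowLoop n.toNat (pvMatT k) pvMatId) 0 0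
      + pvIx (pvMatPowLoop n.toNat (pvMatT k) pvMatId) 1 0
      + pvIx (pvMatPowLoop n.toNat (pvMatT k) pvMatId) 2 0) 12345787 := rfl
  rw [h1, h2, PySem.Int.mod_eq_emod_of_pos (by norm_num), PySem.Int.mod_eq_emod_of_pos (by norm_num)]
  have hcast : ∀ (i : Nat) (h : i < 6),
      ((pvIx (pvMatPowLoop n.toNat (pvMatT k) pvMatId) i 0 : Int) : ZMod 12345787)
        = (pvMcast (pvMatT k) ^ n.toNat) ⟨i, h⟩ 0 := by
    intro i h
    have : ((pvIx (pvMatPowLoop n.toNat (pvMatT k) pvMatId) i 0 : Int) : ZMod 12345787)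
        = pvMcast (pvMatPowLoop n.toNat (pvMatT k) pvMatId) ⟨i, h⟩ 0 := rfl
    rw [this, pv_powLoop, pv_mcast_id, one_mul]
  have key : (((pvIterA k n.toNat).2.1 + (pvIterA k n.toNat).2.2.1
      + (pvIterA k n.toNat).2.2.2 : Int) : ZMod 12345787)
      = ((pvIx (pvMatPowLoop n.toNat (pvMatT k) pvMatId) 0 0
      + pvIx (pvMatPowLoop n.toNat (pvMatT k) pvMatId) 1 0
      + pvIx (pvMatPowLoop n.toNat (pvMatT k) pvMatId) 2 0 : Int) : ZMod 12345787) := by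
    push_cast
    rw [hcast 0 (by norm_num), hcast 1 (by norm_num), hcast 2 (by norm_num),
      ← pv_iter_col k n.toNat ⟨0, by norm_num⟩, ← pv_iter_col k n.toNat ⟨1, by norm_num⟩,
      ← pv_iter_col k n.toNat ⟨2, by norm_num⟩]
    rfl
  have := (ZMod.intCast_eq_intCast_iff' _ _ _).mp key
  norm_num at this
  exact this
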